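-- pv_equiv track=rewrite | github.com/MdAbedin/binarysearch | 0201 - 0300/0206 Direct Closure.py | solve
-- ===== SOURCE A (Python) =====
-- def solve(graph):
--     leaders = {i:i for i in range(len(graph))}
--     followers = {i:[i] for i in range(len(graph))}
--
--     for a in range(len(graph)):
--         for b in graph[a]:
--             big_leader = leaders[a]
--             small_leader = leaders[b]
--             if len(followers[small_leader]) > len(followers[big_leader]): big_leader,small_leader = small_leader, big_leader
--
--             if big_leader == small_leader: continue
--
--             for follower in followers[small_leader]:
--                 leaders[follower] = big_leader
--                 followers[big_leader].append(follower)
--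
--             followers[small_leader] = []
--
--     return [[1 if leaders[i] == leaders[j] else 0 for j in range(len(graph))] for i in range(len(graph))]
-- ===== SOURCE B (Python) =====
-- def solve(graph):
--     n = len(graph)
--     comp = list(range(n))
--     for a in range(n):
--         for b in graph[a]:
--             ca, cb = comp[a], comp[b]
--             if ca != cb:
--                 comp = [ca if c == cb else c for c in comp]
--     return [[1 if comp[i] == comp[j] else 0 for j in range(n)] for i in range(n)]
-- ===== Notes on version B (the rewrite author's own statement) =====
-- stated objective: simpler
-- what changed: Replaces the weighted union-find (leader dict + follower lists merged by size) with a plain quick-find: a single component-label array, merging by rewriting every occurrence of one label in one scan.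
import Mathlib
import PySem

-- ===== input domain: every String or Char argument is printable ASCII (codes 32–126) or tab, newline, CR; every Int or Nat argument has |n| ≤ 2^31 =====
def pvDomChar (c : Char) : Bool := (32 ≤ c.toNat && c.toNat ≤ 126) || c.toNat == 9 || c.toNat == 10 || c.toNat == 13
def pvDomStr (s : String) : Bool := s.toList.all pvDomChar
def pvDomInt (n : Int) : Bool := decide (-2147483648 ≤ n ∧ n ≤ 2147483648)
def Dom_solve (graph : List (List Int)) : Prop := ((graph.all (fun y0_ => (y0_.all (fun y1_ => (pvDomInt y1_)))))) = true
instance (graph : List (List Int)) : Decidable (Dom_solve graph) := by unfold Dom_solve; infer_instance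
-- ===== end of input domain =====

-- B changes the data structure: one component-label array merged by a relabelling scan (quick-find),
-- instead of A's leader dict + follower lists with union-by-size; same return value on Pre_.

-- ===== PORT A =====
-- one edge (a, b) of A's inner loop body, acting on the state (leaders, followers)
def solveEdge (st : PySem.Dict Int Int × PySem.Dict Int (List Int)) (a b : Int) :
    PySem.Dict Int Int × PySem.Dict Int (List Int) :=
  let leaders := st.1
  let followers := st.2
  let bl0 := leaders.getD a 0        -- Python leaders[a]; key present under Pre_
  let sl0 := leaders.getD b 0        -- Python leaders[b]; KeyError excluded by Pre_
  let swap := (followers.getD sl0 []).length > (followers.getD bl0 []).length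
  let big := if swap then sl0 else bl0
  let small := if swap then bl0 else sl0
  if big == small then st
  else
    let fs := followers.getD small []
    let st2 := fs.foldl (fun st f => (st.1.insert f big, st.2.modify big [] (· ++ [f]))) (leaders, followers)
    (st2.1, st2.2.insert small [])

def solve (graph : List (List Int)) : List (List Int) :=
  let n : Int := graph.length
  let leaders0 : PySem.Dict Int Int :=
    (PySem.List.pyRange 0 n 1).foldl (fun d i => d.insert i i) PySem.Dict.empty
  let followers0 : PySem.Dict Int (List Int) :=
    (PySem.List.pyRange 0 n 1).foldl (fun d i => d.insert i [i]) PySem.Dict.empty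
  let st := (PySem.List.pyRange 0 n 1).foldl
    (fun st a => (PySem.List.pyGetD graph a []).foldl (fun st b => solveEdge st a b) st)
    (leaders0, followers0)
  (PySem.List.pyRange 0 n 1).map (fun i =>
    (PySem.List.pyRange 0 n 1).map (fun j =>
      if st.1.getD i 0 == st.1.getD j 0 then 1 else 0))

-- ===== PORT B =====
-- one edge (a, b) of B's inner loop body, acting on the component-label array
def altEdge (comp : List Int) (a b : Int) : List Int :=
  let ca := PySem.List.pyGetD comp a 0
  let cb := PySem.List.pyGetD comp b 0
  if ca != cb then comp.map (fun c => if c == cb then ca else c) else comp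

def solve_alt (graph : List (List Int)) : List (List Int) :=
  let n : Int := graph.length
  let comp := (PySem.List.pyRange 0 n 1).foldl
    (fun comp a => (PySem.List.pyGetD graph a []).foldl (fun comp b => altEdge comp a b) comp)
    (PySem.List.pyRange 0 n 1)
  (PySem.List.pyRange 0 n 1).map (fun i =>
    (PySem.List.pyRange 0 n 1).map (fun j =>
      if PySem.List.pyGetD comp i 0 == PySem.List.pyGetD comp j 0 then 1 else 0))

-- ===== PRECONDITION & SPEC =====
-- Pre_ excludes exactly the inputs where A raises KeyError: an entry b of some row that is not a
-- valid node index 0 ≤ b < len(graph) (leaders[b] then has no such key).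
def Pre_solve (graph : List (List Int)) : Prop :=
  ∀ row ∈ graph, ∀ b ∈ row, 0 ≤ b ∧ b < (graph.length : Int)
instance (graph : List (List Int)) : Decidable (Pre_solve graph) := by unfold Pre_solve; infer_instance
def pvWitness_solve : List (List Int) := [[1], [0, 2], [], [3]]
def Spec_solve (graph : List (List Int)) (out : List (List Int)) : Prop := out = solve_alt graph
instance (graph : List (List Int)) (out : List (List Int)) : Decidable (Spec_solve graph out) := by unfold Spec_solve; infer_instance

-- ===== CLAIM (what is proved, stated in full; the proofs are below) =====
def Claim_equal_solve : Prop := ∀ (graph : List (List Int)), Dom_solve graph → Pre_solve graph → Spec_solve graph (solve graph)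

-- ===== LEMMAS AND PROOFS =====

-- The simulation invariant between A's (leaders, followers) state and B's comp array:
-- leaders covers [0,n) with idempotent in-range values, followers lists a leader's exact class,
-- and the two label functions induce the same equivalence relation on [0,n).
def SimInv (n : Int) (L : PySem.Dict Int Int) (F : PySem.Dict Int (List Int)) (comp : List Int) : Prop :=
  (comp.length : Int) = n ∧
  (∀ i : Int, 0 ≤ i → i < n → 0 ≤ L.getD i 0 ∧ L.getD i 0 < n ∧ L.getD (L.getD i 0) 0 = L.getD i 0) ∧
  (∀ l : Int, 0 ≤ l → l < n → L.getD l 0 = l →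
     ∀ x : Int, x ∈ F.getD l [] ↔ (0 ≤ x ∧ x < n ∧ L.getD x 0 = l)) ∧
  (∀ i j : Int, 0 ≤ i → i < n → 0 ≤ j → j < n →
     (L.getD i 0 = L.getD j 0 ↔ PySem.List.pyGetD comp i 0 = PySem.List.pyGetD comp j 0))

-- a loop of inserts whose value is a function of the key
theorem getD_foldl_insert_fun {ν : Type} (g : Int → ν) (xs : List Int) (d : PySem.Dict Int ν)
    (x : Int) (d0 : ν) :
    (xs.foldl (fun d i => d.insert i (g i)) d).getD x d0 = if x ∈ xs then g x else d.getD x d0 := by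
  induction xs generalizing d with
  | nil => simp
  | cons i xs ih =>
    simp only [List.foldl_cons, ih, PySem.Dict.getD_insert, List.mem_cons]
    by_cases hx : x ∈ xs <;> by_cases hi : x = i <;> simp [hx, hi]

-- a loop appending each element to the list stored at one fixed key
theorem getD_foldl_modify_append_fixed (fs : List Int) (d : PySem.Dict Int (List Int))
    (k x : Int) :
    (fs.foldl (fun d f => d.modify k [] (· ++ [f])) d).getD x [] =
      if x = k then d.getD k [] ++ fs else d.getD x [] := by
  induction fs generalizing d with
  | nil => by_cases hx : x = k <;> simp [hx]
  | cons f fs ih =>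
    simp only [List.foldl_cons, ih, PySem.Dict.getD_modify]
    by_cases hx : x = k <;> simp [hx]

-- relabelling small ↦ big merges exactly the classes of big and small
theorem relabel_eq_iff (u v big small : Int) (_ : big ≠ small) :
    ((if u = small then big else u) = (if v = small then big else v)) ↔
      (u = v ∨ ((u = big ∨ u = small) ∧ (v = big ∨ v = small))) := by
  split_ifs <;> omega

theorem pyGetD_map_of_range (comp : List Int) (g : Int → Int) (i : Int)
    (h0 : 0 ≤ i) (hn : i < (comp.length : Int)) :
    PySem.List.pyGetD (comp.map g) i 0 = g (PySem.List.pyGetD comp i 0) := by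
  rw [PySem.List.pyGetD_eq_getElem (comp.map g) 0 h0 (by simpa using hn),
      PySem.List.pyGetD_eq_getElem comp 0 h0 hn, List.getElem_map]

theorem merge_inv (n a b big small : Int) (L : PySem.Dict Int Int)
    (F : PySem.Dict Int (List Int)) (comp : List Int) (hInv : SimInv n L F comp)
    (ha0 : 0 ≤ a) (han : a < n) (hb0 : 0 ≤ b) (hbn : b < n)
    (hbs : (big = L.getD a 0 ∧ small = L.getD b 0) ∨ (big = L.getD b 0 ∧ small = L.getD a 0))
    (hne : big ≠ small) :
    SimInv n ((F.getD small []).foldl (fun d f => d.insert f big) L)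
      (((F.getD small []).foldl (fun d f => d.modify big [] (· ++ [f])) F).insert small [])
      (comp.map (fun c => if c == PySem.List.pyGetD comp b 0 then PySem.List.pyGetD comp a 0 else c)) := by
  obtain ⟨hlen, hbound, hfol, hrel⟩ := hInv
  obtain ⟨ha1, ha2, ha3⟩ := hbound a ha0 han
  obtain ⟨hb1, hb2, hb3⟩ := hbound b hb0 hbn
  have hbigP : 0 ≤ big ∧ big < n ∧ L.getD big 0 = big := by
    rcases hbs with ⟨h1, _⟩ | ⟨h1, _⟩ <;> rw [h1] <;> exact ⟨by assumption, by assumption, by assumption⟩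
  have hsmallP : 0 ≤ small ∧ small < n ∧ L.getD small 0 = small := by
    rcases hbs with ⟨_, h2⟩ | ⟨_, h2⟩ <;> rw [h2] <;> exact ⟨by assumption, by assumption, by assumption⟩
  have hlane : L.getD a 0 ≠ L.getD b 0 := by
    rcases hbs with ⟨h1, h2⟩ | ⟨h1, h2⟩
    · rw [← h1, ← h2]; exact hne
    · rw [← h1, ← h2]; exact fun h => hne h.symm
  have hcne : PySem.List.pyGetD comp a 0 ≠ PySem.List.pyGetD comp b 0 :=
    fun h => hlane ((hrel a b ha0 han hb0 hbn).mpr h)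
  have hfs : ∀ x : Int, x ∈ F.getD small [] ↔ (0 ≤ x ∧ x < n ∧ L.getD x 0 = small) :=
    hfol small hsmallP.1 hsmallP.2.1 hsmallP.2.2
  have hfb : ∀ x : Int, x ∈ F.getD big [] ↔ (0 ≤ x ∧ x < n ∧ L.getD x 0 = big) :=
    hfol big hbigP.1 hbigP.2.1 hbigP.2.2
  have hL' : ∀ x : Int,
      ((F.getD small []).foldl (fun d f => d.insert f big) L).getD x 0 =
        if x ∈ F.getD small [] then big else L.getD x 0 :=
    fun x => getD_foldl_insert_fun (fun _ => big) _ _ x 0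
  have hL'r : ∀ x : Int, 0 ≤ x → x < n →
      ((F.getD small []).foldl (fun d f => d.insert f big) L).getD x 0 =
        if L.getD x 0 = small then big else L.getD x 0 := by
    intro x h0 h1
    rw [hL']
    by_cases hx : L.getD x 0 = small
    · rw [if_pos ((hfs x).mpr ⟨h0, h1, hx⟩), if_pos hx]
    · rw [if_neg (fun hm => hx ((hfs x).mp hm).2.2), if_neg hx]
  have hF' : ∀ x : Int,
      ((((F.getD small []).foldl (fun d f => d.modify big [] (· ++ [f])) F).insert small []).getD x []) =
        if x = small then [] else if x = big then F.getD big [] ++ F.getD small [] else F.getD x [] := by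
    intro x
    rw [PySem.Dict.getD_insert, getD_foldl_modify_append_fixed]
  have hC : ∀ x : Int, 0 ≤ x → x < n →
      PySem.List.pyGetD
          (comp.map (fun c => if c == PySem.List.pyGetD comp b 0 then PySem.List.pyGetD comp a 0 else c)) x 0 =
        if PySem.List.pyGetD comp x 0 = PySem.List.pyGetD comp b 0 then PySem.List.pyGetD comp a 0
        else PySem.List.pyGetD comp x 0 := by
    intro x h0 h1
    rw [pyGetD_map_of_range comp _ x h0 (by rw [hlen]; exact h1)]
    simp [beq_iff_eq]
  have hmem : ∀ x : Int, 0 ≤ x → x < n →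
      ((L.getD x 0 = big ∨ L.getD x 0 = small) ↔
        (PySem.List.pyGetD comp x 0 = PySem.List.pyGetD comp a 0 ∨
         PySem.List.pyGetD comp x 0 = PySem.List.pyGetD comp b 0)) := by
    intro x h0 h1
    have h1a := hrel x a h0 h1 ha0 han
    have h1b := hrel x b h0 h1 hb0 hbn
    rcases hbs with ⟨hx1, hx2⟩ | ⟨hx1, hx2⟩ <;> rw [hx1, hx2] <;> tauto
  refine ⟨by simp [hlen], ?_, ?_, ?_⟩
  · -- bounds and idempotence
    intro i h0 h1
    rw [hL'r i h0 h1]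
    by_cases hx : L.getD i 0 = small
    · rw [if_pos hx]
      refine ⟨hbigP.1, hbigP.2.1, ?_⟩
      rw [hL'r big hbigP.1 hbigP.2.1, hbigP.2.2, if_neg hne]
    · rw [if_neg hx]
      obtain ⟨g0, g1, g2⟩ := hbound i h0 h1
      refine ⟨g0, g1, ?_⟩
      rw [hL'r _ g0 g1, g2, if_neg hx]
  · -- followers list a leader's class
    intro l h0 h1 hl x
    rw [hF']
    by_cases hls : l = small
    · exfalso
      rw [hls, hL'r small hsmallP.1 hsmallP.2.1, if_pos hsmallP.2.2] at hl
      exact hne hl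
    · rw [if_neg hls]
      by_cases hlb : l = big
      · rw [if_pos hlb, List.mem_append]
        subst hlb
        constructor
        · rintro (hm | hm)
          · obtain ⟨g0, g1, g2⟩ := (hfb x).mp hm
            refine ⟨g0, g1, ?_⟩
            rw [hL'r x g0 g1, g2, if_neg (fun h => hne h)]
          · obtain ⟨g0, g1, g2⟩ := (hfs x).mp hm
            refine ⟨g0, g1, ?_⟩
            rw [hL'r x g0 g1, if_pos g2]
        · rintro ⟨g0, g1, g2⟩
          rw [hL'r x g0 g1] at g2
          by_cases hxs : L.getD x 0 = small
          · exact Or.inr ((hfs x).mpr ⟨g0, g1, hxs⟩)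
          · rw [if_neg hxs] at g2
            exact Or.inl ((hfb x).mpr ⟨g0, g1, g2⟩)
      · rw [if_neg hlb]
        have hll : L.getD l 0 = l := by
          rw [hL'r l h0 h1] at hl
          by_cases hc : L.getD l 0 = small
          · rw [if_pos hc] at hl
            exact absurd hl.symm hlb
          · rw [if_neg hc] at hl
            exact hl
        rw [hfol l h0 h1 hll x]
        constructor
        · rintro ⟨g0, g1, g2⟩
          refine ⟨g0, g1, ?_⟩
          rw [hL'r x g0 g1, g2, if_neg hls]
        · rintro ⟨g0, g1, g2⟩
          refine ⟨g0, g1, ?_⟩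
          rw [hL'r x g0 g1] at g2
          by_cases hxs : L.getD x 0 = small
          · rw [if_pos hxs] at g2
            exact absurd g2.symm hlb
          · rw [if_neg hxs] at g2
            exact g2
  · -- the two relations agree
    intro i j hi0 hin hj0 hjn
    rw [hL'r i hi0 hin, hL'r j hj0 hjn, hC i hi0 hin, hC j hj0 hjn,
      relabel_eq_iff (L.getD i 0) (L.getD j 0) big small hne,
      relabel_eq_iff (PySem.List.pyGetD comp i 0) (PySem.List.pyGetD comp j 0)
        (PySem.List.pyGetD comp a 0) (PySem.List.pyGetD comp b 0) hcne]
    rw [hrel i j hi0 hin hj0 hjn, hmem i hi0 hin, hmem j hj0 hjn]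

theorem edge_inv (n a b : Int) (L : PySem.Dict Int Int) (F : PySem.Dict Int (List Int))
    (comp : List Int) (hInv : SimInv n L F comp)
    (ha0 : 0 ≤ a) (han : a < n) (hb0 : 0 ≤ b) (hbn : b < n) :
    SimInv n (solveEdge (L, F) a b).1 (solveEdge (L, F) a b).2 (altEdge comp a b) := by
  have hcab := hInv.2.2.2 a b ha0 han hb0 hbn
  by_cases hq : L.getD a 0 = L.getD b 0
  · have hc : PySem.List.pyGetD comp a 0 = PySem.List.pyGetD comp b 0 := hcab.mp hq
    have hA : solveEdge (L, F) a b = (L, F) := by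
      simp only [solveEdge, hq, ite_self, beq_self_eq_true, if_true]
    have hB : altEdge comp a b = comp := by
      simp [altEdge, hc]
    rw [hA, hB]
    exact hInv
  · have hc : PySem.List.pyGetD comp a 0 ≠ PySem.List.pyGetD comp b 0 := fun h => hq (hcab.mpr h)
    have hB : altEdge comp a b =
        comp.map (fun c => if c == PySem.List.pyGetD comp b 0 then PySem.List.pyGetD comp a 0 else c) := by
      simp [altEdge, hc]
    rw [hB]
    have hq' : L.getD b 0 ≠ L.getD a 0 := fun h => hq h.symm
    have hsplit : ∀ (fs : List Int) (big : Int) (L : PySem.Dict Int Int)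
        (F : PySem.Dict Int (List Int)),
        fs.foldl (fun st f => (st.1.insert f big, st.2.modify big [] (· ++ [f]))) (L, F) =
          (fs.foldl (fun d f => d.insert f big) L,
           fs.foldl (fun d f => d.modify big [] (· ++ [f])) F) := by
      intro fs big L F
      exact PySem.List.foldl_prod_mk (fun d f => d.insert f big)
        (fun d f => d.modify big [] (· ++ [f])) fs L F
    by_cases hs : (F.getD (L.getD b 0) []).length > (F.getD (L.getD a 0) []).length
    · have hA : solveEdge (L, F) a b =
          ((F.getD (L.getD a 0) []).foldl (fun d f => d.insert f (L.getD b 0)) L,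
           ((F.getD (L.getD a 0) []).foldl (fun d f => d.modify (L.getD b 0) [] (· ++ [f])) F).insert
             (L.getD a 0) []) := by
        simp only [solveEdge, if_pos hs, beq_iff_eq, if_neg hq', hsplit]
      rw [hA]
      exact merge_inv n a b (L.getD b 0) (L.getD a 0) L F comp hInv ha0 han hb0 hbn
        (Or.inr ⟨rfl, rfl⟩) hq'
    · have hA : solveEdge (L, F) a b =
          ((F.getD (L.getD b 0) []).foldl (fun d f => d.insert f (L.getD a 0)) L,
           ((F.getD (L.getD b 0) []).foldl (fun d f => d.modify (L.getD a 0) [] (· ++ [f])) F).insert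
             (L.getD b 0) []) := by
        simp only [solveEdge, if_neg hs, beq_iff_eq, if_neg hq, hsplit]
      rw [hA]
      exact merge_inv n a b (L.getD a 0) (L.getD b 0) L F comp hInv ha0 han hb0 hbn
        (Or.inl ⟨rfl, rfl⟩) hq

theorem inner_inv (n a : Int) (row : List Int)
    (ha0 : 0 ≤ a) (han : a < n)
    (hrow : ∀ b ∈ row, 0 ≤ b ∧ b < n)
    (L : PySem.Dict Int Int) (F : PySem.Dict Int (List Int)) (comp : List Int)
    (h : SimInv n L F comp) :
    SimInv n (row.foldl (fun st b => solveEdge st a b) (L, F)).1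
      (row.foldl (fun st b => solveEdge st a b) (L, F)).2
      (row.foldl (fun comp b => altEdge comp a b) comp) := by
  induction row generalizing L F comp with
  | nil => exact h
  | cons b row ih =>
    simp only [List.foldl_cons]
    have hb := hrow b (List.mem_cons_self ..)
    have hstep := edge_inv n a b L F comp h ha0 han hb.1 hb.2
    have heta : solveEdge (L, F) a b = ((solveEdge (L, F) a b).1, (solveEdge (L, F) a b).2) := rfl
    rw [heta]
    exact ih (fun b hb => hrow b (List.mem_cons_of_mem _ hb)) _ _ _ hstep

theorem outer_inv (n : Int) (graph : List (List Int)) (as : List Int)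
    (has : ∀ a ∈ as, 0 ≤ a ∧ a < n)
    (hrows : ∀ a : Int, 0 ≤ a → a < n → ∀ b ∈ PySem.List.pyGetD graph a [], 0 ≤ b ∧ b < n)
    (L : PySem.Dict Int Int) (F : PySem.Dict Int (List Int)) (comp : List Int)
    (h : SimInv n L F comp) :
    SimInv n
      (as.foldl (fun st a => (PySem.List.pyGetD graph a []).foldl (fun st b => solveEdge st a b) st) (L, F)).1
      (as.foldl (fun st a => (PySem.List.pyGetD graph a []).foldl (fun st b => solveEdge st a b) st) (L, F)).2
      (as.foldl (fun comp a => (PySem.List.pyGetD graph a []).foldl (fun comp b => altEdge comp a b) comp) comp) := by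
  induction as generalizing L F comp with
  | nil => exact h
  | cons a as ih =>
    simp only [List.foldl_cons]
    have ha := has a (List.mem_cons_self ..)
    have hstep := inner_inv n a (PySem.List.pyGetD graph a []) ha.1 ha.2
      (hrows a ha.1 ha.2) L F comp h
    have heta : ∀ st : PySem.Dict Int Int × PySem.Dict Int (List Int), st = (st.1, st.2) := fun _ => rfl
    rw [heta ((PySem.List.pyGetD graph a []).foldl (fun st b => solveEdge st a b) (L, F))]
    exact ih (fun a ha => has a (List.mem_cons_of_mem _ ha)) _ _ _ hstep

theorem init_inv (n : Int) (hn : 0 ≤ n) :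
    SimInv n ((PySem.List.pyRange 0 n 1).foldl (fun d i => d.insert i i) PySem.Dict.empty)
      ((PySem.List.pyRange 0 n 1).foldl (fun d i => d.insert i [i]) PySem.Dict.empty)
      (PySem.List.pyRange 0 n 1) := by
  have hlf : ∀ x : Int,
      ((PySem.List.pyRange 0 n 1).foldl (fun d i => d.insert i i) PySem.Dict.empty).getD x 0
        = if x ∈ PySem.List.pyRange 0 n 1 then x else 0 :=
    fun x => getD_foldl_insert_fun (fun i => i) _ _ x 0
  have hff : ∀ x : Int,
      ((PySem.List.pyRange 0 n 1).foldl (fun d i => d.insert i [i]) PySem.Dict.empty).getD x []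
        = if x ∈ PySem.List.pyRange 0 n 1 then [x] else [] :=
    fun x => getD_foldl_insert_fun (fun i => [i]) _ _ x []
  have hlfr : ∀ x : Int, 0 ≤ x → x < n →
      ((PySem.List.pyRange 0 n 1).foldl (fun d i => d.insert i i) PySem.Dict.empty).getD x 0 = x := by
    intro x h0 h1
    rw [hlf]
    simp [PySem.List.mem_pyRange_one, h0, h1]
  have hcf : ∀ i : Int, 0 ≤ i → i < n → PySem.List.pyGetD (PySem.List.pyRange 0 n 1) i 0 = i := by
    intro i h0 h1
    rw [PySem.List.pyGetD_eq_getElem _ 0 h0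
      (by rw [PySem.List.length_pyRange_one]; omega)]
    rw [PySem.List.getElem_pyRange_one]
    omega
  refine ⟨by rw [PySem.List.length_pyRange_one]; omega, ?_, ?_, ?_⟩
  · intro i h0 h1
    rw [hlfr i h0 h1]
    exact ⟨h0, h1, hlfr i h0 h1⟩
  · intro l h0 h1 _ x
    rw [hff]
    simp only [PySem.List.mem_pyRange_one, h0, h1, and_self, if_true, List.mem_singleton]
    constructor
    · rintro rfl
      exact ⟨h0, h1, hlfr _ h0 h1⟩
    · rintro ⟨hx0, hxn, hx⟩
      rw [hlfr x hx0 hxn] at hx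
      omega
  · intro i j hi0 hin hj0 hjn
    rw [hlfr i hi0 hin, hlfr j hj0 hjn, hcf i hi0 hin, hcf j hj0 hjn]

-- ===== VERDICT (by name: the statement is the Claim_ definition above) =====
theorem solve_spec : Claim_equal_solve := by
  intro graph _ hpre
  show solve graph = solve_alt graph
  have hn : (0 : Int) ≤ (graph.length : Int) := Int.natCast_nonneg _
  have hrows : ∀ a : Int, 0 ≤ a → a < (graph.length : Int) →
      ∀ b ∈ PySem.List.pyGetD graph a [], 0 ≤ b ∧ b < (graph.length : Int) := by
    intro a h0 h1 b hb
    rw [PySem.List.pyGetD_eq_getElem graph [] h0 (by simpa using h1)] at hb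
    exact hpre _ (List.getElem_mem _) b hb
  have hfin := outer_inv (graph.length : Int) graph (PySem.List.pyRange 0 (graph.length : Int) 1)
    (fun a ha => PySem.List.mem_pyRange_one.mp ha) hrows _ _ _
    (init_inv (graph.length : Int) hn)
  obtain ⟨hlen, hbound, hfol, hrel⟩ := hfin
  simp only [solve, solve_alt]
  refine List.map_congr_left (fun i hi => ?_)
  refine List.map_congr_left (fun j hj => ?_)
  obtain ⟨hi0, hin⟩ := PySem.List.mem_pyRange_one.mp hi
  obtain ⟨hj0, hjn⟩ := PySem.List.mem_pyRange_one.mp hj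
  have h := hrel i j hi0 hin hj0 hjn
  simp only [beq_iff_eq, h]
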